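-- pv_equiv track=rewrite | github.com/SestrenExsis/CodeKatas | adventofcode/AdventOfCode2015.py | solve
-- ===== SOURCE A (Python) =====
-- def solve(sue_data, analysis):
--     detected_sue_id = None
--     for sue_id, data in sue_data.items():
--         for key, val in analysis.items():
--             if key not in data:
--                 continue
--             if val != data[key]:
--                 break
--         else:
--             detected_sue_id = sue_id
--             break
--     result = detected_sue_id
--     return result
-- ===== SOURCE B (Python) =====
-- def solve(sue_data, analysis):
--     # Inverted index over all sue data entries: key -> [(position, value), ...];
--     # each clue then eliminates exactly the conflicting positions.
--     index = {}
--     ids = []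
--     for pos, (sue_id, data) in enumerate(sue_data.items()):
--         ids.append(sue_id)
--         for k, v in data.items():
--             index.setdefault(k, []).append((pos, v))
--     eliminated = set()
--     for k, val in analysis.items():
--         for pos, v in index.get(k, ()):
--             if v != val:
--                 eliminated.add(pos)
--     return next((sid for pos, sid in enumerate(ids) if pos not in eliminated), None)
-- ===== Notes on version B (the rewrite author's own statement) =====
-- stated objective: alternative
-- what changed: Replaces A's nested per-sue clue scan (with break/else) by a different algorithm: one pass builds an inverted index key->[(position, value)], each clue then eliminates exactly its conflicting positions into a set, and the first non-eliminated position is returned.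
import Mathlib
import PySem

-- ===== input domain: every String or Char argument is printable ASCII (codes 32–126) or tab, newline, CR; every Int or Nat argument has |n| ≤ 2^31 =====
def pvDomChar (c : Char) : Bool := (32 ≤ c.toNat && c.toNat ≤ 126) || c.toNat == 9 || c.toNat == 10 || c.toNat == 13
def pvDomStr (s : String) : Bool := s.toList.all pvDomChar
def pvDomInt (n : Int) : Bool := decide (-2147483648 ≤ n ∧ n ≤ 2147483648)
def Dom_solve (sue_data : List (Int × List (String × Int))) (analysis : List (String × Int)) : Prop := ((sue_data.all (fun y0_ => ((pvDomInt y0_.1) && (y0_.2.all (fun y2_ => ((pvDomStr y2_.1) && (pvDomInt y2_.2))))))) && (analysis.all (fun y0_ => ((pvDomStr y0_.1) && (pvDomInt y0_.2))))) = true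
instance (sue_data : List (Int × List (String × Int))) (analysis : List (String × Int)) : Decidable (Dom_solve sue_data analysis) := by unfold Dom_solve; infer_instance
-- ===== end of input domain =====

-- B replaces A's per-sue clue scan by an inverted index plus a set of clue-eliminated
-- positions (objective: a genuinely different, constraint-elimination algorithm).

-- dict lookup 'key in data' / 'data[key]' (first match; dict arguments have unique keys)
def dlookup (data : List (String × Int)) (k : String) : Option Int :=
  match data with
  | [] => none
  | (k', v) :: rest => if k' = k then some v else dlookup rest k

-- ===== PORT A =====
-- inner 'for key, val in analysis.items(): …' loop with break/else; returns true iff the else-branch runs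
def solveInner (data : List (String × Int)) : List (String × Int) → Bool
  | [] => true
  | (key, val) :: rest =>
    match dlookup data key with
    | none => solveInner data rest              -- continue
    | some w => if val ≠ w then false           -- break
                else solveInner data rest

def solve (sue_data : List (Int × List (String × Int))) (analysis : List (String × Int)) : Option Int :=
  match sue_data with
  | [] => none
  | (sue_id, data) :: rest =>
    if solveInner data analysis then some sue_id   -- detected_sue_id = sue_id; break
    else solve rest analysis

-- ===== PORT B =====
def solve_alt (sue_data : List (Int × List (String × Int))) (analysis : List (String × Int)) : Option Int :=
  -- index = {}; ids = []; for pos, (sue_id, data) in enumerate(...): ids.append; per item setdefault-append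
  let st := (PySem.List.enumerate sue_data 0).foldl
      (fun (st : PySem.Dict String (List (Int × Int)) × List Int) pe =>
        (pe.2.2.foldl (fun d kv => PySem.Dict.modify d kv.1 [] (· ++ [(pe.1, kv.2)])) st.1,
         st.2 ++ [pe.2.1]))
      (PySem.Dict.empty, [])
  -- eliminated = set(); per clue add every conflicting position
  let eliminated := analysis.foldl
      (fun s kv => (PySem.Dict.getD st.1 kv.1 []).foldl
          (fun s pv => if pv.2 ≠ kv.2 then PySem.Set.add s pv.1 else s) s)
      PySem.Set.empty
  -- next((sid for pos, sid in enumerate(ids) if pos not in eliminated), None)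
  ((PySem.List.enumerate st.2 0).find? (fun p => !(PySem.Set.contains eliminated p.1))).map (·.2)

-- ===== PRECONDITION & SPEC =====
-- Python's sue data are dicts, whose keys are necessarily distinct; Pre_ excludes only the
-- association lists with a duplicate key inside some sue's data, which no dict input produces.
def Pre_solve (sue_data : List (Int × List (String × Int))) (analysis : List (String × Int)) : Prop :=
  ∀ p ∈ sue_data, (p.2.map Prod.fst).Nodup
instance (sue_data : List (Int × List (String × Int))) (analysis : List (String × Int)) : Decidable (Pre_solve sue_data analysis) := by unfold Pre_solve; infer_instance
def pvWitness_solve : (List (Int × List (String × Int))) × (List (String × Int)) := ([(1, [("a", 2)])], [("a", 2)])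

def Spec_solve (sue_data : List (Int × List (String × Int))) (analysis : List (String × Int)) (out : Option Int) : Prop := out = solve_alt sue_data analysis
instance (sue_data : List (Int × List (String × Int))) (analysis : List (String × Int)) (out : Option Int) : Decidable (Spec_solve sue_data analysis out) := by unfold Spec_solve; infer_instance

-- ===== CLAIM (what is proved, stated in full; the proofs are below) =====
def Claim_equal_solve : Prop := ∀ (sue_data : List (Int × List (String × Int))) (analysis : List (String × Int)), Dom_solve sue_data analysis → Pre_solve sue_data analysis → Spec_solve sue_data analysis (solve sue_data analysis)

-- ===== LEMMAS AND PROOFS =====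

-- (key, val) clue admits data iff key absent or mapped to val (proof-side helper)
def clueOK (key : String) (val : Int) (d : List (String × Int)) : Bool :=
  match dlookup d key with
  | none => true
  | some w => val == w

-- A's inner loop succeeds iff every clue admits the data
theorem solveInner_eq_all (data : List (String × Int)) (analysis : List (String × Int)) :
    solveInner data analysis = analysis.all (fun kv => clueOK kv.1 kv.2 data) := by
  induction analysis with
  | nil => rfl
  | cons kv rest ih =>
    obtain ⟨key, val⟩ := kv
    cases h : dlookup data key with
    | none =>
      have hc : clueOK key val data = true := by simp [clueOK, h]
      simp [solveInner, h, hc, ih]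
    | some w =>
      by_cases hv : val = w
      · subst hv
        have hc : clueOK key val data = true := by simp [clueOK, h]
        simp [solveInner, h, hc, ih]
      · have hc : clueOK key val data = false := by simp [clueOK, h, hv]
        simp [solveInner, h, hv, hc]

-- A is first-match search
theorem solve_eq_find (sue_data : List (Int × List (String × Int))) (analysis : List (String × Int)) :
    solve sue_data analysis = (sue_data.find? (fun q => solveInner q.2 analysis)).map (·.1) := by
  induction sue_data with
  | nil => rfl
  | cons p rest ih =>
    obtain ⟨sue_id, data⟩ := p
    by_cases h : solveInner data analysis = true <;> simp [solve, List.find?, h, ih]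

-- the index-building fold, named for the lemmas below
def buildStep (st : PySem.Dict String (List (Int × Int)) × List Int)
    (pe : Int × (Int × List (String × Int))) : PySem.Dict String (List (Int × Int)) × List Int :=
  (pe.2.2.foldl (fun d kv => PySem.Dict.modify d kv.1 [] (· ++ [(pe.1, kv.2)])) st.1,
   st.2 ++ [pe.2.1])

theorem build_fst (l : List (Int × (Int × List (String × Int))))
    (d : PySem.Dict String (List (Int × Int))) (ids : List Int) (k : String) :
    PySem.Dict.getD (l.foldl buildStep (d, ids)).1 k []
      = PySem.Dict.getD d k []
        ++ l.flatMap (fun pe => (pe.2.2.filter (fun kv => kv.1 == k)).map (fun kv => (pe.1, kv.2))) := by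
  induction l generalizing d ids with
  | nil => simp
  | cons pe rest ih =>
    rw [List.foldl_cons, List.flatMap_cons]
    have hstep : (buildStep (d, ids) pe).1
        = (pe.2.2.map (fun kv => (kv.1, (pe.1, kv.2)))).foldl
            (fun d p => PySem.Dict.modify d p.1 [] (· ++ [p.2])) d := by
      simp [buildStep, List.foldl_map]
    have hrec := ih (buildStep (d, ids) pe).1 (buildStep (d, ids) pe).2
    have : rest.foldl buildStep (buildStep (d, ids) pe) = rest.foldl buildStep ((buildStep (d, ids) pe).1, (buildStep (d, ids) pe).2) := by rfl
    rw [this, hrec, hstep, PySem.Dict.getD_foldl_modify_append, List.filter_map, List.map_map]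
    simp [Function.comp_def, List.append_assoc]

theorem build_snd (l : List (Int × (Int × List (String × Int))))
    (d : PySem.Dict String (List (Int × Int))) (ids : List Int) :
    (l.foldl buildStep (d, ids)).2 = ids ++ l.map (fun pe => pe.2.1) := by
  induction l generalizing d ids with
  | nil => simp
  | cons pe rest ih =>
    rw [List.foldl_cons]
    have : buildStep (d, ids) pe = ((buildStep (d, ids) pe).1, ids ++ [pe.2.1]) := by rfl
    rw [this, ih]
    simp

-- membership in the inner 'add all conflicting positions' fold
theorem mem_foldl_add_if {β : Type} (l : List β) (c : β → Prop) [DecidablePred c]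
    (g : β → Int) (s : PySem.Set Int) (y : Int) :
    (y ∈ l.foldl (fun s x => if c x then PySem.Set.add s (g x) else s) s)
      ↔ y ∈ s ∨ ∃ x ∈ l, c x ∧ g x = y := by
  induction l generalizing s with
  | nil => simp
  | cons x rest ih =>
    by_cases h : c x <;> simp [h, ih, PySem.Set.mem_add] <;> tauto

-- membership in the whole elimination fold
theorem mem_elim (analysis : List (String × Int)) (I : String → List (Int × Int))
    (s0 : PySem.Set Int) (y : Int) :
    (y ∈ analysis.foldl
        (fun s kv => (I kv.1).foldl
            (fun s pv => if pv.2 ≠ kv.2 then PySem.Set.add s pv.1 else s) s) s0)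
      ↔ y ∈ s0 ∨ ∃ kv ∈ analysis, ∃ pv ∈ I kv.1, pv.2 ≠ kv.2 ∧ pv.1 = y := by
  induction analysis generalizing s0 with
  | nil => simp
  | cons kv rest ih =>
    rw [List.foldl_cons, ih, mem_foldl_add_if]
    simp only [List.mem_cons]
    constructor
    · rintro ((h | ⟨pv, hpv, hne, hy⟩) | ⟨kv', hkv', pv, hpv, hne, hy⟩)
      · exact Or.inl h
      · exact Or.inr ⟨kv, Or.inl rfl, pv, hpv, hne, hy⟩
      · exact Or.inr ⟨kv', Or.inr hkv', pv, hpv, hne, hy⟩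
    · rintro (h | ⟨kv', (rfl | hkv'), pv, hpv, hne, hy⟩)
      · exact Or.inl (Or.inl h)
      · exact Or.inl (Or.inr ⟨pv, hpv, hne, hy⟩)
      · exact Or.inr ⟨kv', hkv', pv, hpv, hne, hy⟩

-- with distinct keys, association-list membership is first-match lookup
theorem dlookup_eq_some_iff (data : List (String × Int)) (hnd : (data.map Prod.fst).Nodup)
    (k : String) (v : Int) : dlookup data k = some v ↔ (k, v) ∈ data := by
  induction data with
  | nil => simp [dlookup]
  | cons p rest ih =>
    obtain ⟨k', v'⟩ := p
    simp only [List.map_cons, List.nodup_cons] at hnd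
    by_cases hk : k' = k
    · subst hk
      simp only [dlookup, List.mem_cons]
      constructor
      · rintro h
        exact Or.inl (by simpa using h.symm)
      · rintro (h | h)
        · simp at h
          simp [h]
        · exact absurd (List.mem_map_of_mem (f := Prod.fst) h) (by simpa using hnd.1)
    · rw [dlookup, if_neg hk, ih hnd.2]
      simp only [List.mem_cons]
      constructor
      · exact Or.inr
      · rintro (h | h)
        · cases h; exact absurd rfl hk
        · exact h

-- B's final first-surviving-position scan equals A's first-match search, given the
-- pointwise correspondence between positions and sues
theorem find_enum_eq (an : List (String × Int)) (xs : List (Int × List (String × Int)))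
    (s : Int) (P : Int → Bool)
    (h : ∀ (k : Nat) (hk : k < xs.length), P (s + (k : Int)) = solveInner xs[k].2 an) :
    ((PySem.List.enumerate (xs.map (fun q => q.1)) s).find? (fun p => P p.1)).map (·.2)
      = (xs.find? (fun q => solveInner q.2 an)).map (·.1) := by
  induction xs generalizing s with
  | nil => simp
  | cons x rest ih =>
    have h0 : P s = solveInner x.2 an := by
      have := h 0 (by simp)
      simpa using this
    rw [List.map_cons, PySem.List.enumerate_cons]
    by_cases hx : solveInner x.2 an = true
    · simp [List.find?, h0, hx]
    · have hx' : solveInner x.2 an = false := by simp [hx]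
      have hrec := ih (s + 1) (by
        intro k hk
        have := h (k + 1) (by simpa using Nat.succ_lt_succ hk)
        have harith : s + ((k : Int) + 1) = s + 1 + (k : Int) := by ring
        simpa [harith] using this)
      simp only [List.find?, h0, hx']
      exact hrec

-- position p survives elimination iff sue p matches every clue
theorem solve_spec : Claim_equal_solve := by
  intro sd an _ hpre
  unfold Spec_solve
  set st := (PySem.List.enumerate sd 0).foldl buildStep (PySem.Dict.empty, ([] : List Int)) with hst
  set elim := an.foldl
      (fun s kv => (PySem.Dict.getD st.1 kv.1 []).foldl
          (fun s pv => if pv.2 ≠ kv.2 then PySem.Set.add s pv.1 else s) s)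
      PySem.Set.empty with helim
  have hBdef : solve_alt sd an
      = ((PySem.List.enumerate st.2 0).find? (fun p => !(PySem.Set.contains elim p.1))).map (·.2) := rfl
  have hids : st.2 = sd.map (fun q => q.1) := by
    rw [hst, build_snd]
    rw [List.nil_append]
    have : (PySem.List.enumerate sd 0).map (fun pe => pe.2.1)
        = ((PySem.List.enumerate sd 0).map (·.2)).map (fun q => q.1) := by
      rw [List.map_map]; rfl
    rw [this, PySem.List.map_snd_enumerate]
  have hindex : ∀ key : String, PySem.Dict.getD st.1 key []
      = (PySem.List.enumerate sd 0).flatMap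
          (fun pe => (pe.2.2.filter (fun kv => kv.1 == key)).map (fun kv => (pe.1, kv.2))) := by
    intro key
    rw [hst, build_fst]
    simp [PySem.Dict.getD, PySem.Dict.empty, PySem.Dict.get?]
  -- membership in the eliminated set, in terms of the input
  have hmem : ∀ y : Int, y ∈ elim ↔
      ∃ kv ∈ an, ∃ (j : Nat), ∃ (hj : j < sd.length), ∃ kvd ∈ sd[j].2,
        kvd.1 = kv.1 ∧ kvd.2 ≠ kv.2 ∧ (j : Int) = y := by
    intro y
    rw [helim]
    refine Iff.trans (mem_elim an (fun key => PySem.Dict.getD st.1 key []) PySem.Set.empty y) ?_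
    rw [show (y ∈ (PySem.Set.empty : PySem.Set Int)) ↔ False from by simp [PySem.Set.empty], false_or]
    constructor
    · rintro ⟨kv, hkv, pv, hpv, hne, hy⟩
      rw [hindex] at hpv
      rw [List.mem_flatMap] at hpv
      obtain ⟨pe, hpe, hpv⟩ := hpv
      rw [PySem.List.mem_enumerate_iff] at hpe
      obtain ⟨j, hj, rfl⟩ := hpe
      simp only [List.mem_map, List.mem_filter] at hpv
      obtain ⟨kvd, ⟨hkvd, hkey⟩, rfl⟩ := hpv
      refine ⟨kv, hkv, j, hj, kvd, hkvd, by simpa using hkey, by simpa using hne, by simpa using hy⟩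
    · rintro ⟨kv, hkv, j, hj, kvd, hkvd, hkey, hne, hy⟩
      refine ⟨kv, hkv, ((j : Int), kvd.2), ?_, by simpa using hne, by simpa using hy⟩
      rw [hindex, List.mem_flatMap]
      refine ⟨((0 : Int) + (j : Nat), sd[j]), ?_, ?_⟩
      · rw [PySem.List.mem_enumerate_iff]
        exact ⟨j, hj, rfl⟩
      · simp only [List.mem_map, List.mem_filter]
        exact ⟨kvd, ⟨hkvd, by simp [hkey]⟩, by simp⟩
  -- pointwise: surviving position k ↔ sue k matches
  have hpt : ∀ (k : Nat) (hk : k < sd.length),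
      (!(PySem.Set.contains elim ((0 : Int) + (k : Int)))) = solveInner sd[k].2 an := by
    intro k hk
    rw [show ((0 : Int) + (k : Int)) = (k : Int) from by omega]
    have hnd : (sd[k].2.map Prod.fst).Nodup := hpre sd[k] (List.getElem_mem hk)
    have hiff : ((k : Int)) ∈ elim ↔ solveInner sd[k].2 an = false := by
      constructor
      · intro hm
        obtain ⟨kv, hkv, j, hj, kvd, hkvd, hkey, hne, hy⟩ := (hmem _).mp hm
        have hjk : j = k := by
          have : (j : Int) = (k : Int) := by omega
          exact_mod_cast this
        subst hjk
        rw [solveInner_eq_all]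
        rw [List.all_eq_false]
        refine ⟨kv, hkv, ?_⟩
        have hdl : dlookup sd[j].2 kv.1 = some kvd.2 := by
          rw [dlookup_eq_some_iff _ hnd, ← hkey]
          exact hkvd
        simp [clueOK, hdl, hne.symm]
      · intro hs
        rw [solveInner_eq_all, List.all_eq_false] at hs
        obtain ⟨kv, hkv, hck⟩ := hs
        rw [Bool.not_eq_true] at hck
        unfold clueOK at hck
        cases hdl : dlookup sd[k].2 kv.1 with
        | none => rw [hdl] at hck; simp at hck
        | some w =>
          rw [hdl] at hck
          have hw : w ≠ kv.2 := by
            intro h; rw [h] at hck; simp at hck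
          have hmemd : (kv.1, w) ∈ sd[k].2 := (dlookup_eq_some_iff _ hnd _ _).mp hdl
          exact (hmem _).mpr ⟨kv, hkv, k, hk, (kv.1, w), hmemd, rfl, hw, by omega⟩
    cases hs : solveInner sd[k].2 an with
    | false =>
      rw [(PySem.Set.contains_iff elim (k : Int)).mpr (hiff.mpr hs)]
      rfl
    | true =>
      have hc : PySem.Set.contains elim ((k : Int)) = false := by
        rw [← Bool.not_eq_true, PySem.Set.contains_iff]
        intro hm; rw [hiff, hs] at hm; cases hm
      rw [hc]
      rfl
  rw [hBdef, hids, solve_eq_find]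
  exact (find_enum_eq an sd 0 (fun j => !(PySem.Set.contains elim j)) hpt).symm
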